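-- pv_equiv track=rewrite | github.com/Muhammed-Elsayed/IEEE-ZSB-Technical-Rookies-22 | task4/pset2.py | counting_the_letters
-- ===== SOURCE A (Python) =====
-- def counting_the_letters(letter, num):
--     while True:
--         if len(letter) == num:
--             break
--
--         elif len(letter) > num:
--             letter = letter[:-1]
--
--         else:
--             letter = letter + letter
--     counter = 0
--     for x in letter:
--         if x == "r":
--            counter += 1
--
--     return counter
-- ===== SOURCE B (Python) =====
-- def _rcount(s):
--     return sum(1 for c in s if c == "r")
--
--
-- def counting_the_letters(letter, num):
--     if num == 0:
--         return 0
--     full, rem = divmod(num, len(letter))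
--     return full * _rcount(letter) + _rcount(letter[:rem])
-- ===== Notes on version B (the rewrite author's own statement) =====
-- stated objective: faster
-- what changed: Replaces A's while-loop that doubles/truncates the string until its length is exactly num (then scans it) with a closed-form count: num//len(letter) full periods times the 'r'-count of letter plus the 'r'-count of the remainder prefix letter[:num%len(letter)].
import Mathlib
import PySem

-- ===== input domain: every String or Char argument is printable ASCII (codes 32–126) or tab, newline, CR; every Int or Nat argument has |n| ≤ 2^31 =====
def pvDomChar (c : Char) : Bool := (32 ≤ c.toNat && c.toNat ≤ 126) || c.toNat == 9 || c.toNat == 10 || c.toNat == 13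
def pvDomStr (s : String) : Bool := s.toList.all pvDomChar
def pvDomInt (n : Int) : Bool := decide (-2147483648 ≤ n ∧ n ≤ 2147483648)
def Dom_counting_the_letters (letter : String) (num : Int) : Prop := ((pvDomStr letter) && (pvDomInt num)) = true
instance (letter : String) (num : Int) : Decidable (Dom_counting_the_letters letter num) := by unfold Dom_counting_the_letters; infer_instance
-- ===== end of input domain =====

-- B replaces A's O(num)-iteration double/truncate loop with a closed-form
-- periodic count (full periods * count of 'r' in letter + count in the remainder prefix).

-- ===== PORT A =====
-- A's 'while True' loop; the fuel argument is only a totality guard: on every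
-- input admitted by Pre_ it strictly exceeds the number of loop iterations
-- (proved in the lemmas below), so the port computes exactly what A computes.
def pvWhileA (fuel : Nat) (letter : List Char) (num : Int) : List Char :=
  match fuel with
  | 0 => letter
  | f + 1 =>
    if (letter.length : Int) = num then letter
    else if (letter.length : Int) > num then
      pvWhileA f (PySem.List.slice letter none (some (-1))) num   -- letter = letter[:-1]
    else
      pvWhileA f (letter ++ letter) num                           -- letter = letter + letter

def counting_the_letters (letter : String) (num : Int) : Int :=
  let l := pvWhileA (letter.toList.length + 2 * num.toNat + 1) letter.toList num
  -- counter = 0; for x in letter: if x == "r": counter += 1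
  l.foldl (fun counter x => if x == 'r' then counter + 1 else counter) 0

-- ===== PORT B =====
-- _rcount(s) = sum(1 for c in s if c == "r")
def pvRcount (s : List Char) : Int :=
  ((s.filter (fun c => c == 'r')).map (fun _ => (1 : Int))).sum

def counting_the_letters_alt (letter : String) (num : Int) : Int :=
  if num = 0 then 0
  else
    match PySem.Int.divmod? num (PySem.Str.len letter) with
    | none => 0   -- Python's divmod raises ZeroDivisionError here (letter = ""); excluded by Pre_
    | some (full, rem) =>
        full * pvRcount letter.toList
          + pvRcount (PySem.List.slice letter.toList none (some rem))   -- letter[:rem]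

-- ===== PRECONDITION & SPEC =====
-- Pre_ excludes exactly the inputs on which A never returns: A's while-loop
-- diverges when num < 0 (truncation can never reach a negative length) and when
-- letter is empty with num ≠ 0 (doubling the empty string never changes it).
def Pre_counting_the_letters (letter : String) (num : Int) : Prop :=
  0 ≤ num ∧ (letter ≠ "" ∨ num = 0)
instance (letter : String) (num : Int) : Decidable (Pre_counting_the_letters letter num) := by
  unfold Pre_counting_the_letters; infer_instance

def pvWitness_counting_the_letters : String × Int := ("roar", 10)

def Spec_counting_the_letters (letter : String) (num : Int) (out : Int) : Prop := out = counting_the_letters_alt letter num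
instance (letter : String) (num : Int) (out : Int) : Decidable (Spec_counting_the_letters letter num out) := by unfold Spec_counting_the_letters; infer_instance

-- ===== CLAIM (what is proved, stated in full; the proofs are below) =====
def Claim_equal_counting_the_letters : Prop := ∀ (letter : String) (num : Int), Dom_counting_the_letters letter num → Pre_counting_the_letters letter num → Spec_counting_the_letters letter num (counting_the_letters letter num)

-- ===== LEMMAS AND PROOFS =====

-- the closed-form quantity B computes, on the Nat side
def pvQ (l : List Char) (n : Nat) : Nat :=
  n / l.length * l.count 'r' + (l.take (n % l.length)).count 'r'

-- loop measure: strictly decreases at every iteration of A's while-loop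
def pvMu (l : List Char) (n : Nat) : Nat :=
  if n ≤ l.length then l.length - n else 2 * n - l.length

lemma pvQ_exit (l : List Char) (n : Nat) (hn : 1 ≤ n) (h : l.length = n) :
    pvQ l n = l.count 'r' := by
  simp [pvQ, h, Nat.div_self (by omega : 0 < n), Nat.mod_self]

lemma pvQ_drop (l : List Char) (n : Nat) (hn : 1 ≤ n) (h : n < l.length) :
    pvQ l.dropLast n = pvQ l n := by
  have hL : l.dropLast.length = l.length - 1 := by simp
  rcases Nat.lt_or_ge n (l.length - 1) with hlt | hge
  · have h1 : n / l.dropLast.length = 0 := Nat.div_eq_of_lt (by omega)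
    have h2 : n % l.dropLast.length = n := Nat.mod_eq_of_lt (by omega)
    have h3 : n / l.length = 0 := Nat.div_eq_of_lt h
    have h4 : n % l.length = n := Nat.mod_eq_of_lt h
    have htake : l.dropLast.take n = l.take n := by
      rw [List.dropLast_eq_take, List.take_take, Nat.min_eq_left (by omega)]
    simp only [pvQ, h1, h2, h3, h4, htake, Nat.zero_mul, Nat.zero_add]
  · have hEq : l.dropLast.length = n := by omega
    have h3 : n / l.length = 0 := Nat.div_eq_of_lt h
    have h4 : n % l.length = n := Nat.mod_eq_of_lt h
    simp only [pvQ, hEq, Nat.div_self (by omega : 0 < n), Nat.mod_self, h3, h4,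
      Nat.zero_mul, Nat.zero_add, List.take_zero, List.count_nil, Nat.one_mul,
      Nat.add_zero]
    rw [List.dropLast_eq_take]
    congr 2
    omega

lemma pvQ_append (l : List Char) (n : Nat) (hne : l ≠ []) :
    pvQ (l ++ l) n = pvQ l n := by
  have hL : 0 < l.length := List.length_pos_iff.mpr hne
  have hlen : (l ++ l).length = l.length * 2 := by rw [List.length_append]; omega
  have hdiv : n / (l.length * 2) = n / l.length / 2 :=
    (Nat.div_div_eq_div_mul n l.length 2).symm
  have hmod : n % (l.length * 2) = n % l.length + l.length * (n / l.length % 2) :=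
    Nat.mod_mul
  have hcnt : (l ++ l).count 'r' = l.count 'r' + l.count 'r' := by
    simp [List.count_append]
  rcases Nat.even_or_odd (n / l.length) with ⟨k, hk⟩ | ⟨k, hk⟩
  · -- n / len even: remainder of the double period lies in the first copy
    have hq2 : n / l.length % 2 = 0 := by omega
    have htake : (l ++ l).take (n % (l.length * 2)) = l.take (n % l.length) := by
      rw [hmod, hq2, Nat.mul_zero, Nat.add_zero]
      exact List.take_append_of_le_length (le_of_lt (Nat.mod_lt _ hL))
    simp only [pvQ, hlen, hdiv, htake, hcnt]
    have h2 : n / l.length / 2 = k := by omega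
    rw [h2, hk]
    ring
  · -- n / len odd: remainder covers the first copy plus a prefix of the second
    have hq2 : n / l.length % 2 = 1 := by omega
    have htake : (l ++ l).take (n % (l.length * 2)) = l ++ l.take (n % l.length) := by
      rw [hmod, hq2, Nat.mul_one, List.take_append,
        List.take_of_length_le (by omega)]
      congr 2
      omega
    simp only [pvQ, hlen, hdiv, htake, hcnt, List.count_append]
    have h2 : n / l.length / 2 = k := by omega
    rw [h2, hk]
    ring

lemma pvWhileA_count (fuel : Nat) (l : List Char) (n : Nat)
    (hne : l ≠ []) (hn : 1 ≤ n) (hfuel : pvMu l n < fuel) :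
    (pvWhileA fuel l (n : Int)).count 'r' = pvQ l n := by
  induction fuel generalizing l with
  | zero => omega
  | succ f ih =>
    have hL : 0 < l.length := List.length_pos_iff.mpr hne
    rw [pvWhileA]
    by_cases heq : (l.length : Int) = (n : Int)
    · rw [if_pos heq]
      exact (pvQ_exit l n hn (by exact_mod_cast heq)).symm
    · rw [if_neg heq]
      by_cases hgt : (l.length : Int) > (n : Int)
      · rw [if_pos hgt]
        have hlt : n < l.length := by exact_mod_cast hgt
        have hdl : l.dropLast.length = l.length - 1 := by simp
        have hne' : l.dropLast ≠ [] := by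
          intro hnil
          rw [hnil] at hdl
          simp at hdl
          omega
        have hmu : pvMu l.dropLast n < f := by
          unfold pvMu at hfuel ⊢
          rw [hdl]
          split at hfuel <;> split <;> omega
        rw [PySem.List.slice_to_neg_one, ih l.dropLast hne' hmu]
        exact pvQ_drop l n hn hlt
      · rw [if_neg hgt]
        have hlt : l.length < n := by omega
        have hlen2 : (l ++ l).length = 2 * l.length := by
          rw [List.length_append]; omega
        have hmu : pvMu (l ++ l) n < f := by
          unfold pvMu at hfuel ⊢
          rw [hlen2]
          split at hfuel <;> split <;> omega
        rw [ih (l ++ l) (by simp [hne]) hmu]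
        exact pvQ_append l n hne

lemma pvWhileA_zero (fuel : Nat) (l : List Char)
    (hfuel : l.length < fuel) :
    (pvWhileA fuel l (0 : Int)).count 'r' = 0 := by
  induction fuel generalizing l with
  | zero => omega
  | succ f ih =>
    rw [pvWhileA]
    by_cases heq : (l.length : Int) = (0 : Int)
    · rw [if_pos heq]
      have : l = [] := List.length_eq_zero_iff.mp (by exact_mod_cast heq)
      simp [this]
    · rw [if_neg heq]
      have hL : 0 < l.length := by omega
      rw [if_pos (by exact_mod_cast hL)]
      rw [PySem.List.slice_to_neg_one]
      have hdl : l.dropLast.length = l.length - 1 := by simp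
      exact ih l.dropLast (by omega)

lemma pvRcount_eq (s : List Char) : pvRcount s = (s.count 'r' : Int) := by
  simp only [pvRcount, List.map_const', List.sum_replicate, Int.nsmul_eq_mul,
    mul_one, Nat.cast_inj]
  rw [← List.countP_eq_length_filter]
  rfl

-- ===== VERDICT (by name: the statement is the Claim_ definition above) =====
theorem counting_the_letters_spec : Claim_equal_counting_the_letters := by
  intro letter num _ hpre
  obtain ⟨hnum, hcase⟩ := hpre
  unfold Spec_counting_the_letters counting_the_letters counting_the_letters_alt
  set l := letter.toList with hl
  rw [PySem.List.foldl_beq_add_one, Int.zero_add]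
  by_cases h0 : num = 0
  · subst h0
    rw [if_pos rfl]
    have h := pvWhileA_zero (l.length + 1) l (by omega)
    simp [h]
  · rw [if_neg h0]
    have hne : l ≠ [] := by
      rcases hcase with hs | h0'
      · intro hnil
        exact hs (String.toList_eq_nil_iff.mp (hl.symm.trans hnil))
      · exact absurd h0' h0
    have hL : 0 < l.length := List.length_pos_iff.mpr hne
    have hlen0 : PySem.Str.len letter ≠ 0 := by
      simp [PySem.Str.len, ← hl]
      omega
    obtain ⟨n, rfl⟩ : ∃ n : Nat, num = (n : Int) := ⟨num.toNat, (Int.toNat_of_nonneg hnum).symm⟩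
    have hn1 : 1 ≤ n := by omega
    rw [pvWhileA_count _ l n hne hn1
        (by unfold pvMu; rw [Int.toNat_natCast]; split <;> omega)]
    unfold PySem.Int.divmod?
    rw [if_neg hlen0]
    have hfdiv : (n : Int).fdiv (PySem.Str.len letter) = ((n / l.length : Nat) : Int) := by
      rw [PySem.Str.len, ← hl, Int.fdiv_eq_ediv_of_nonneg _ (by positivity)]
      exact_mod_cast Int.ofNat_ediv_ofNat
    have hfmod : (n : Int).fmod (PySem.Str.len letter) = ((n % l.length : Nat) : Int) := by
      rw [PySem.Str.len, ← hl]
      exact (Int.ofNat_fmod n l.length).symm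
    simp only [hfdiv, hfmod, pvRcount_eq, PySem.List.slice_to_natCast]
    unfold pvQ
    push_cast
    ring
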